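-- pv_equiv track=rewrite | github.com/Yatharth007Pathak/python-dsa | KMaxContiguousVowels.py | kvowelwords
-- ===== SOURCE A (Python) =====
-- def kvowelwords(N, K):
--     # Define the number of vowels and consonants
--     vowels = {'a', 'e', 'i', 'o', 'u'}
--     total_alphabets = 26
--     consonants = total_alphabets - len(vowels)
--
--     # Initialize a dp array
--     dp = [[0] * (K + 1) for _ in range(N + 1)]
--     mod = 10**9 + 7
--
--     # Base case: If length is 0, there's one empty string
--     dp[0][0] = 1
--
--     # Fill the dp array
--     for i in range(1, N + 1):
--         for j in range(K + 1):
--             # Add words ending with a consonant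
--             dp[i][0] = (dp[i][0] + dp[i - 1][j] * consonants) % mod
--
--             # Add words ending with a vowel (only if j > 0)
--             if j > 0:
--                 dp[i][j] = (dp[i][j] + dp[i - 1][j - 1] * len(vowels)) % mod
--
--     # Calculate the total number of words
--     result = 0
--     for j in range(K + 1):
--         result = (result + dp[N][j]) % mod
--
--     return result
-- ===== SOURCE B (Python) =====
-- def kvowelwords(N, K):
--     # O(N): rolling recurrence on row totals.
--     # t[i] = number of length-i strings with every vowel-run <= K (mod p);
--     # h[i] = number of those ending in a consonant (run length 0).
--     # t[i] = 26*t[i-1] - 5*(strings of length i-1 ending in a maximal K-run)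
--     #      = 26*t[i-1] - 5 * 5^K * h[i-1-K].
--     mod = 10**9 + 7
--     pK = pow(5, K, mod)
--     t = [1]
--     h = [1]
--     for i in range(1, N + 1):
--         d = pK * h[i - 1 - K] % mod if i - 1 >= K else 0
--         t.append((26 * t[i - 1] - 5 * d) % mod)
--         h.append(21 * t[i - 1] % mod)
--     return t[N]
-- ===== Notes on version B (the rewrite author's own statement) =====
-- stated objective: faster
-- what changed: Replaced the O(N*K) dp table (rows indexed by trailing-vowel run length) by an O(N) rolling recurrence on row totals, t[i] = 26*t[i-1] - 5*5^K*h[i-1-K] mod p, tracking only the row total t and the consonant-ending count h.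
import Mathlib
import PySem

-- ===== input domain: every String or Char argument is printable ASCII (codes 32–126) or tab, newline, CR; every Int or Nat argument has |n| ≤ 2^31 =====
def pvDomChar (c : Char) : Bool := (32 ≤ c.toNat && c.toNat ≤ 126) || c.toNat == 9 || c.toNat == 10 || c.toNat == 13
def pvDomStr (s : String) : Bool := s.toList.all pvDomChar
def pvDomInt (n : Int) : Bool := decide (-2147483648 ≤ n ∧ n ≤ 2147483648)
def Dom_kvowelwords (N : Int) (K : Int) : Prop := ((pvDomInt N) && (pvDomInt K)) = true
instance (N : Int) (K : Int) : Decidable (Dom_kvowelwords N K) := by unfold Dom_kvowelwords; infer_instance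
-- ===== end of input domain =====

-- B replaces A's O(N·K) dp table by an O(N) rolling recurrence on row totals (asymptotically faster).

-- ===== PORT A =====
-- literal port of A's dp-table loop; list indexing/assignment via pyGetD/pySetD
-- (total forms; exact on Pre_, where every index is in range)
def kvowelwords (N : Int) (K : Int) : Int :=
  -- vowels = {'a','e','i','o','u'}: len(vowels) = 5
  let numVowels : Int := 5
  let total_alphabets : Int := 26
  let consonants : Int := total_alphabets - numVowels
  -- dp = [[0]*(K+1) for _ in range(N+1)]  (negative counts give empty lists, as in Python)
  let dp : List (List Int) := List.replicate (N + 1).toNat (List.replicate (K + 1).toNat (0 : Int))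
  let mod : Int := 10 ^ 9 + 7
  -- dp[0][0] = 1
  let dp := PySem.List.pySetD dp 0 (PySem.List.pySetD (PySem.List.pyGetD dp 0 ([] : List Int)) 0 1)
  let dp := (PySem.List.pyRange 1 (N + 1) 1).foldl (fun dp i =>
    (PySem.List.pyRange 0 (K + 1) 1).foldl (fun dp j =>
      -- dp[i][0] = (dp[i][0] + dp[i-1][j] * consonants) % mod
      let dp := PySem.List.pySetD dp i (PySem.List.pySetD (PySem.List.pyGetD dp i []) 0
        (PySem.Int.mod (PySem.List.pyGetD (PySem.List.pyGetD dp i []) 0 0 +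
          PySem.List.pyGetD (PySem.List.pyGetD dp (i - 1) []) j 0 * consonants) mod))
      -- if j > 0: dp[i][j] = (dp[i][j] + dp[i-1][j-1] * len(vowels)) % mod
      if j > 0 then
        PySem.List.pySetD dp i (PySem.List.pySetD (PySem.List.pyGetD dp i []) j
          (PySem.Int.mod (PySem.List.pyGetD (PySem.List.pyGetD dp i []) j 0 +
            PySem.List.pyGetD (PySem.List.pyGetD dp (i - 1) []) (j - 1) 0 * numVowels) mod))
      else dp) dp) dp
  -- result = 0; for j in range(K+1): result = (result + dp[N][j]) % mod
  (PySem.List.pyRange 0 (K + 1) 1).foldl (fun result j =>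
    PySem.Int.mod (result + PySem.List.pyGetD (PySem.List.pyGetD dp N []) j 0) mod) 0

-- ===== PORT B =====
-- literal port of Source B: row totals t and consonant-ending counts h, appended left to right
def kvowelwords_alt (N : Int) (K : Int) : Int :=
  let mod : Int := 10 ^ 9 + 7
  -- pK = pow(5, K, mod): exact for 0 ≤ K (Pre_)
  let pK : Int := PySem.Int.powMod 5 K.toNat mod
  let th : List Int × List Int := (PySem.List.pyRange 1 (N + 1) 1).foldl (fun th i =>
    let t := th.1
    let h := th.2
    let d : Int := if i - 1 ≥ K then PySem.Int.mod (pK * PySem.List.pyGetD h (i - 1 - K) 0) mod else 0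
    (t ++ [PySem.Int.mod (26 * PySem.List.pyGetD t (i - 1) 0 - 5 * d) mod],
     h ++ [PySem.Int.mod (21 * PySem.List.pyGetD t (i - 1) 0) mod])) ([1], [1])
  PySem.List.pyGetD th.1 N 0

-- ===== PRECONDITION & SPEC =====
-- Pre_ excludes exactly the inputs where A raises IndexError: N < 0 (dp has no row 0)
-- or K < 0 (row 0 is empty), so dp[0][0] = 1 fails.
def Pre_kvowelwords (N : Int) (K : Int) : Prop := 0 ≤ N ∧ 0 ≤ K
instance (N : Int) (K : Int) : Decidable (Pre_kvowelwords N K) := by unfold Pre_kvowelwords; infer_instance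
def pvWitness_kvowelwords : Int × Int := (3, 2)

def Spec_kvowelwords (N : Int) (K : Int) (out : Int) : Prop := out = kvowelwords_alt N K
instance (N : Int) (K : Int) (out : Int) : Decidable (Spec_kvowelwords N K out) := by unfold Spec_kvowelwords; infer_instance

-- ===== CLAIM (what is proved, stated in full; the proofs are below) =====
def Claim_equal_kvowelwords : Prop := ∀ (N : Int) (K : Int), Dom_kvowelwords N K → Pre_kvowelwords N K → Spec_kvowelwords N K (kvowelwords N K)

-- ===== LEMMAS AND PROOFS =====

def pvP : Int := 10 ^ 9 + 7
theorem pvP_pos : 0 < pvP := by norm_num [pvP]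
def pvRow (k : Nat) : Nat → List Int
  | 0 => 1 :: List.replicate k 0
  | i + 1 => (21 * (pvRow k i).sum % pvP) :: ((pvRow k i).take k).map (fun x => x * 5 % pvP)

theorem pvRow_length (k i : Nat) : (pvRow k i).length = k + 1 := by
  induction i with
  | zero => simp [pvRow]
  | succ i ih => simp [pvRow, ih]

theorem pvRow_getD_succ (k i j : Nat) (hj : j < k) :
    (pvRow k (i + 1)).getD (j + 1) 0 = (pvRow k i).getD j 0 * 5 % pvP := by
  have hjl : j < ((pvRow k i).take k).length := by simp [pvRow_length]; omega
  have hjr : j < (pvRow k i).length := by simp [pvRow_length]; omega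
  simp only [pvRow, List.getD_cons_succ]
  rw [List.getD_eq_getElem?_getD, List.getElem?_map, List.getElem?_eq_getElem hjl]
  simp only [List.getElem_take, Option.map_some, Option.getD_some,
    List.getD_eq_getElem?_getD, List.getElem?_eq_getElem hjr, Option.getD_some]

theorem pvRow_getD_eq_zero (k i : Nat) : ∀ j, i < j → j ≤ k → (pvRow k i).getD j 0 = 0 := by
  induction i with
  | zero =>
    intro j h1 h2
    match j, h1 with
    | j + 1, _ => simp [pvRow]
  | succ i ih =>
    intro j h1 h2
    match j, h1 with
    | j + 1, _ =>
      rw [pvRow_getD_succ k i j (by omega), ih j (by omega) (by omega)]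
      simp

-- one inner-loop iteration, acting on row `cur` only
def pvStep (prev cur : List Int) (j : Int) : List Int :=
  let c1 := PySem.List.pySetD cur 0
    (PySem.Int.mod (PySem.List.pyGetD cur 0 0 + PySem.List.pyGetD prev j 0 * (26 - 5)) pvP)
  if j > 0 then
    PySem.List.pySetD c1 j
      (PySem.Int.mod (PySem.List.pyGetD c1 j 0 + PySem.List.pyGetD prev (j - 1) 0 * 5) pvP)
  else c1

-- dp after the first i outer iterations
def pvDp (k n i : Nat) : List (List Int) :=
  (List.range (n + 1)).map (fun m => if m ≤ i then pvRow k m else List.replicate (k + 1) 0)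

theorem pvDp_length (k n i : Nat) : (pvDp k n i).length = n + 1 := by simp [pvDp]

theorem pvDp_getD (k n i m : Nat) (hm : m ≤ n) :
    PySem.List.pyGetD (pvDp k n i) (m : Int) [] =
      if m ≤ i then pvRow k m else List.replicate (k + 1) 0 := by
  rw [PySem.List.pyGetD_natCast, List.getD_eq_getElem?_getD, pvDp, List.getElem?_map,
    List.getElem?_range (by omega)]
  rfl

-- localize a fold whose body writes only row r (reading rows r-1 and r)

-- partial state of the inner loop after the first m iterations
def pvPartial (k : Nat) (prev : List Int) : Nat → List Int
  | 0 => List.replicate (k + 1) 0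
  | m + 1 => (21 * (prev.take (m + 1)).sum % pvP) ::
      ((prev.take m).map (fun x => x * 5 % pvP) ++ List.replicate (k - m) 0)

theorem pvTake_sum_succ (prev : List Int) (m : Nat) (hm : m < prev.length) :
    (prev.take (m + 1)).sum = (prev.take m).sum + prev.getD m 0 := by
  rw [List.sum_take_succ _ _ hm]
  simp [List.getD_eq_getElem?_getD, List.getElem?_eq_getElem hm]

theorem pvStep_partial (k : Nat) (prev : List Int) (hlen : prev.length = k + 1)
    (m : Nat) (hm : m ≤ k) :
    pvStep prev (pvPartial k prev m) (m : Int) = pvPartial k prev (m + 1) := by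
  match m with
  | 0 =>
    simp only [pvStep, pvPartial, Nat.cast_zero]
    rw [if_neg (by norm_num)]
    rw [PySem.List.pySetD_of_nonneg _ _ le_rfl, PySem.List.pyGetD_of_nonneg _ _ le_rfl,
      PySem.List.pyGetD_of_nonneg _ _ le_rfl]
    rw [show Int.toNat 0 = 0 from rfl, show (List.replicate (k+1) (0:Int)) = 0 :: List.replicate k 0 from rfl]
    simp only [List.set_cons_zero, List.getD_cons_zero, List.take_zero, List.map_nil,
      List.nil_append, Nat.sub_zero]
    congr 1
    rw [PySem.Int.mod_eq_emod_of_pos pvP_pos, pvTake_sum_succ prev 0 (by omega)]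
    simp only [List.take_zero, List.sum_nil]
    ring_nf
  | m + 1 =>
    have hmp : m + 1 < prev.length := by omega
    have hmap_len : ((prev.take m).map (fun x => x * 5 % pvP)).length = m := by
      simp; omega
    have hrep : List.replicate (k - m) (0:Int) = 0 :: List.replicate (k - m - 1) 0 := by
      rw [show k - m = (k - m - 1) + 1 by omega]; rfl
    simp only [pvStep, pvPartial]
    rw [if_pos (by exact_mod_cast Nat.succ_pos m)]
    rw [PySem.List.pySetD_of_nonneg (i := (0:Int)) _ _ le_rfl]
    rw [show Int.toNat 0 = 0 from rfl, List.set_cons_zero]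
    rw [PySem.List.pySetD_natCast _ (m + 1), List.set_cons_succ]
    rw [PySem.List.pyGetD_of_nonneg (i := (0:Int)) _ _ le_rfl]
    rw [show Int.toNat 0 = 0 from rfl, List.getD_cons_zero]
    rw [show ((m + 1 : Nat) : Int) - 1 = ((m : Nat) : Int) by push_cast; ring]
    rw [PySem.List.pyGetD_natCast prev (m + 1), PySem.List.pyGetD_natCast prev m]
    rw [PySem.List.pyGetD_natCast _ (m + 1), List.getD_cons_succ]
    have hrest0 : (List.map (fun x => x * 5 % pvP) (List.take m prev) ++
        List.replicate (k - m) (0:Int)).getD m 0 = 0 := by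
      rw [List.getD_eq_getElem?_getD, List.getElem?_append_right (by omega), hmap_len]
      simp only [Nat.sub_self, List.getElem?_replicate]
      rw [if_pos (by omega)]
      rfl
    rw [hrest0]
    have hsetm : (List.map (fun x => x * 5 % pvP) (List.take m prev) ++
        List.replicate (k - m) (0:Int)).set m (PySem.Int.mod (0 + prev.getD m 0 * 5) pvP) =
        List.map (fun x => x * 5 % pvP) (List.take (m + 1) prev) ++
          List.replicate (k - (m + 1)) (0:Int) := by
      rw [List.set_append, if_neg (by omega), hmap_len, Nat.sub_self, hrep, List.set_cons_zero]
      rw [List.take_add_one, List.getElem?_eq_getElem (by omega : m < prev.length)]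
      simp only [Option.toList_some, List.map_append, List.map_cons, List.map_nil, List.append_assoc,
        List.cons_append, List.nil_append]
      congr 2
      rw [PySem.Int.mod_eq_emod_of_pos pvP_pos, List.getD_eq_getElem?_getD,
        List.getElem?_eq_getElem (by omega : m < prev.length)]
      simp only [Option.getD_some, zero_add]
    rw [hsetm]
    congr 1
    rw [PySem.Int.mod_eq_emod_of_pos pvP_pos, Int.emod_add_emod,
      pvTake_sum_succ prev (m + 1) (by omega)]
    ring_nf

theorem pvPartial_fold (k : Nat) (prev : List Int) (hlen : prev.length = k + 1) :
    ∀ m, m ≤ k + 1 →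
    (List.range m).foldl (fun c j => pvStep prev c ((j : Nat) : Int)) (List.replicate (k + 1) 0)
      = pvPartial k prev m := by
  intro m
  induction m with
  | zero => intro _; rfl
  | succ m ih =>
    intro hm
    rw [List.range_succ, List.foldl_append, ih (by omega)]
    simp only [List.foldl_cons, List.foldl_nil]
    exact pvStep_partial k prev hlen m (by omega)

theorem pvInner (k : Nat) (prev : List Int) (hlen : prev.length = k + 1) :
    (PySem.List.pyRange 0 ((k : Int) + 1) 1).foldl (pvStep prev) (List.replicate (k + 1) 0)
      = 21 * prev.sum % pvP :: (prev.take k).map (fun x => x * 5 % pvP) := by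
  rw [show ((k : Int) + 1) = ((k + 1 : Nat) : Int) by push_cast; ring,
    PySem.List.pyRange_zero_nat, List.foldl_map, pvPartial_fold k prev hlen (k + 1) le_rfl]
  simp only [pvPartial, Nat.sub_self, List.replicate_zero, List.append_nil]
  rw [List.take_of_length_le (by omega)]

theorem pvInner_local (l : List Int) : ∀ (dp : List (List Int)) (r : Nat), 1 ≤ r → r < dp.length →
    l.foldl (fun dp j =>
      if j > 0 then
        PySem.List.pySetD (PySem.List.pySetD dp (r : Int) (PySem.List.pySetD (PySem.List.pyGetD dp (r : Int) []) 0
        (PySem.Int.mod (PySem.List.pyGetD (PySem.List.pyGetD dp (r : Int) []) 0 0 +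
          PySem.List.pyGetD (PySem.List.pyGetD dp ((r : Int) - 1) []) j 0 * (26 - 5)) pvP))) (r : Int) (PySem.List.pySetD (PySem.List.pyGetD (PySem.List.pySetD dp (r : Int) (PySem.List.pySetD (PySem.List.pyGetD dp (r : Int) []) 0
        (PySem.Int.mod (PySem.List.pyGetD (PySem.List.pyGetD dp (r : Int) []) 0 0 +
          PySem.List.pyGetD (PySem.List.pyGetD dp ((r : Int) - 1) []) j 0 * (26 - 5)) pvP))) (r : Int) []) j
          (PySem.Int.mod (PySem.List.pyGetD (PySem.List.pyGetD (PySem.List.pySetD dp (r : Int) (PySem.List.pySetD (PySem.List.pyGetD dp (r : Int) []) 0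
        (PySem.Int.mod (PySem.List.pyGetD (PySem.List.pyGetD dp (r : Int) []) 0 0 +
          PySem.List.pyGetD (PySem.List.pyGetD dp ((r : Int) - 1) []) j 0 * (26 - 5)) pvP))) (r : Int) []) j 0 +
            PySem.List.pyGetD (PySem.List.pyGetD (PySem.List.pySetD dp (r : Int) (PySem.List.pySetD (PySem.List.pyGetD dp (r : Int) []) 0
        (PySem.Int.mod (PySem.List.pyGetD (PySem.List.pyGetD dp (r : Int) []) 0 0 +
          PySem.List.pyGetD (PySem.List.pyGetD dp ((r : Int) - 1) []) j 0 * (26 - 5)) pvP))) ((r : Int) - 1) []) (j - 1) 0 * 5) pvP))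
      else PySem.List.pySetD dp (r : Int) (PySem.List.pySetD (PySem.List.pyGetD dp (r : Int) []) 0
        (PySem.Int.mod (PySem.List.pyGetD (PySem.List.pyGetD dp (r : Int) []) 0 0 +
          PySem.List.pyGetD (PySem.List.pyGetD dp ((r : Int) - 1) []) j 0 * (26 - 5)) pvP))) dp
    = PySem.List.pySetD dp (r : Int)
        (l.foldl (pvStep (PySem.List.pyGetD dp ((r : Int) - 1) [])) (PySem.List.pyGetD dp (r : Int) [])) := by
  induction l with
  | nil =>
    intro dp r h1 h2
    simp only [List.foldl_nil, PySem.List.pySetD_natCast, PySem.List.pyGetD_natCast]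
    rw [List.getD_eq_getElem?_getD, List.getElem?_eq_getElem h2]
    simp
  | cons x t ih =>
    intro dp r h1 h2
    have hr1 : ((r : Int) - 1) = ((r - 1 : Nat) : Int) := by push_cast [h1]; ring
    have hprev : ∀ v, PySem.List.pyGetD (PySem.List.pySetD dp (r : Int) v) ((r : Int) - 1) []
        = PySem.List.pyGetD dp ((r : Int) - 1) [] := by
      intro v
      rw [hr1, PySem.List.pyGetD_pySetD_natCast _ _ _ _ _ h2, if_neg (by omega)]
    have hcur : ∀ v, PySem.List.pyGetD (PySem.List.pySetD dp (r : Int) v) (r : Int) [] = v := by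
      intro v
      rw [PySem.List.pyGetD_pySetD_natCast _ _ _ _ _ h2, if_pos rfl]
    have hss : ∀ a b, PySem.List.pySetD (PySem.List.pySetD dp (r : Int) a) (r : Int) b
        = PySem.List.pySetD dp (r : Int) b := by
      intro a b; simp only [PySem.List.pySetD_natCast, List.set_set]
    simp only [List.foldl_cons, hprev, hcur, hss]
    rw [← apply_ite (PySem.List.pySetD dp (r : Int))]
    rw [show (if x > 0 then
        PySem.List.pySetD (PySem.List.pySetD (PySem.List.pyGetD dp (r : Int) []) 0
          (PySem.Int.mod (PySem.List.pyGetD (PySem.List.pyGetD dp (r : Int) []) 0 0 +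
            PySem.List.pyGetD (PySem.List.pyGetD dp ((r : Int) - 1) []) x 0 * (26 - 5)) pvP)) x
          (PySem.Int.mod (PySem.List.pyGetD (PySem.List.pySetD (PySem.List.pyGetD dp (r : Int) []) 0
              (PySem.Int.mod (PySem.List.pyGetD (PySem.List.pyGetD dp (r : Int) []) 0 0 +
                PySem.List.pyGetD (PySem.List.pyGetD dp ((r : Int) - 1) []) x 0 * (26 - 5)) pvP)) x 0 +
            PySem.List.pyGetD (PySem.List.pyGetD dp ((r : Int) - 1) []) (x - 1) 0 * 5) pvP)
      else
        PySem.List.pySetD (PySem.List.pyGetD dp (r : Int) []) 0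
          (PySem.Int.mod (PySem.List.pyGetD (PySem.List.pyGetD dp (r : Int) []) 0 0 +
            PySem.List.pyGetD (PySem.List.pyGetD dp ((r : Int) - 1) []) x 0 * (26 - 5)) pvP))
      = pvStep (PySem.List.pyGetD dp ((r : Int) - 1) []) (PySem.List.pyGetD dp (r : Int) []) x from rfl]
    rw [ih _ r h1 (by simpa using h2)]
    rw [hprev, hcur, hss]

theorem pvDp_zero (k n : Nat) :
    pvDp k n 0 = pvRow k 0 :: List.replicate n (List.replicate (k + 1) 0) := by
  apply List.ext_getElem (by simp [pvDp])
  intro j h1 h2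
  simp only [pvDp, List.getElem_map, List.getElem_range]
  match j with
  | 0 => simp
  | j + 1 =>
    rw [if_neg (by omega)]
    simp only [pvDp, List.length_map, List.length_range] at h1
    simp [List.getElem_replicate]

theorem pvDp_set (k n i : Nat) (_hin : i + 1 ≤ n) :
    PySem.List.pySetD (pvDp k n i) ((i + 1 : Nat) : Int) (pvRow k (i + 1)) = pvDp k n (i + 1) := by
  rw [PySem.List.pySetD_natCast]
  apply List.ext_getElem (by simp [pvDp])
  intro j h1 h2
  rw [List.getElem_set]
  simp only [pvDp, List.getElem_map, List.getElem_range]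
  by_cases hj : i + 1 = j
  · rw [if_pos hj, if_pos (by omega), ← hj]
  · rw [if_neg hj]
    by_cases hj2 : j ≤ i
    · rw [if_pos hj2, if_pos (by omega)]
    · rw [if_neg hj2, if_neg (by omega)]

theorem pvFoldSum (l : List Int) : ∀ a : Int, a % pvP = a →
    l.foldl (fun acc x => (acc + x) % pvP) a = (a + l.sum) % pvP := by
  induction l with
  | nil => intro a ha; simpa using ha.symm
  | cons x t ih =>
    intro a ha
    simp only [List.foldl_cons, List.sum_cons]
    rw [ih _ (by rw [Int.emod_emod_of_dvd _ (dvd_refl pvP)]), Int.emod_add_emod, add_assoc]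

theorem pvOuterFold (n k : Nat) : ∀ i, i ≤ n →
    (PySem.List.pyRange 1 ((i : Int) + 1) 1).foldl (fun dp i =>
      (PySem.List.pyRange 0 ((k : Int) + 1) 1).foldl (fun dp j =>
        if j > 0 then
          PySem.List.pySetD (PySem.List.pySetD dp i (PySem.List.pySetD (PySem.List.pyGetD dp i []) 0
          (PySem.Int.mod (PySem.List.pyGetD (PySem.List.pyGetD dp i []) 0 0 +
            PySem.List.pyGetD (PySem.List.pyGetD dp (i - 1) []) j 0 * (26 - 5)) pvP))) i (PySem.List.pySetD (PySem.List.pyGetD (PySem.List.pySetD dp i (PySem.List.pySetD (PySem.List.pyGetD dp i []) 0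
          (PySem.Int.mod (PySem.List.pyGetD (PySem.List.pyGetD dp i []) 0 0 +
            PySem.List.pyGetD (PySem.List.pyGetD dp (i - 1) []) j 0 * (26 - 5)) pvP))) i []) j
            (PySem.Int.mod (PySem.List.pyGetD (PySem.List.pyGetD (PySem.List.pySetD dp i (PySem.List.pySetD (PySem.List.pyGetD dp i []) 0
          (PySem.Int.mod (PySem.List.pyGetD (PySem.List.pyGetD dp i []) 0 0 +
            PySem.List.pyGetD (PySem.List.pyGetD dp (i - 1) []) j 0 * (26 - 5)) pvP))) i []) j 0 +
              PySem.List.pyGetD (PySem.List.pyGetD (PySem.List.pySetD dp i (PySem.List.pySetD (PySem.List.pyGetD dp i []) 0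
          (PySem.Int.mod (PySem.List.pyGetD (PySem.List.pyGetD dp i []) 0 0 +
            PySem.List.pyGetD (PySem.List.pyGetD dp (i - 1) []) j 0 * (26 - 5)) pvP))) (i - 1) []) (j - 1) 0 * 5) pvP))
        else PySem.List.pySetD dp i (PySem.List.pySetD (PySem.List.pyGetD dp i []) 0
          (PySem.Int.mod (PySem.List.pyGetD (PySem.List.pyGetD dp i []) 0 0 +
            PySem.List.pyGetD (PySem.List.pyGetD dp (i - 1) []) j 0 * (26 - 5)) pvP))) dp) (pvDp k n 0) = pvDp k n i := by
  intro i
  induction i with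
  | zero =>
    intro _
    rw [show ((0 : Nat) : Int) + 1 = 1 by norm_num]
    rw [PySem.List.pyRange_one_eq_nil (le_refl (1 : Int))]
    rfl
  | succ i ih =>
    intro hin
    rw [show ((i + 1 : Nat) : Int) + 1 = ((i : Int) + 1) + 1 by push_cast; ring,
      PySem.List.pyRange_one_succ_right (a := 1) (b := (i : Int) + 1) (by omega),
      List.foldl_append, ih (by omega)]
    simp only [List.foldl_cons, List.foldl_nil]
    rw [show ((i : Int) + 1) = ((i + 1 : Nat) : Int) by push_cast; ring]
    rw [pvInner_local _ (pvDp k n i) (i + 1) (by omega) (by rw [pvDp_length]; omega)]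
    rw [show ((i + 1 : Nat) : Int) - 1 = ((i : Nat) : Int) by push_cast; ring]
    rw [pvDp_getD k n i i (by omega), if_pos le_rfl]
    rw [pvDp_getD k n i (i + 1) (by omega), if_neg (by omega)]
    rw [pvInner k (pvRow k i) (pvRow_length k i)]
    rw [show (21 * (pvRow k i).sum % pvP :: ((pvRow k i).take k).map (fun x => x * 5 % pvP))
      = pvRow k (i + 1) from rfl]
    exact pvDp_set k n i (by omega)

theorem pvSetD_zero {α : Type} (xs : List α) (v : α) :
    PySem.List.pySetD xs 0 v = xs.set 0 v := by
  rw [PySem.List.pySetD_of_nonneg _ _ le_rfl]; rfl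

theorem pvGetD_zero {α : Type} (xs : List α) (d : α) :
    PySem.List.pyGetD xs 0 d = xs.getD 0 d := by
  rw [PySem.List.pyGetD_of_nonneg _ _ le_rfl]; rfl

theorem kvowelwords_eq_model (n k : Nat) :
    kvowelwords (n : Int) (k : Int) = (pvRow k n).sum % pvP := by
  simp only [kvowelwords]
  rw [show ((10:Int) ^ 9 + 7) = pvP from rfl]
  rw [show ((n : Int) + 1) = ((n + 1 : Nat) : Int) by push_cast; ring]
  rw [show ((k : Int) + 1) = ((k + 1 : Nat) : Int) by push_cast; ring]
  rw [Int.toNat_natCast, Int.toNat_natCast]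
  simp only [pvSetD_zero, pvGetD_zero]
  rw [show (List.replicate (n + 1) (List.replicate (k + 1) (0:Int)))
      = List.replicate (k + 1) (0:Int) :: List.replicate n (List.replicate (k + 1) 0) from rfl]
  rw [List.getD_cons_zero, List.set_cons_zero]
  rw [show (List.replicate (k + 1) (0:Int)) = 0 :: List.replicate k 0 from rfl,
    List.set_cons_zero]
  rw [show ((1:Int) :: List.replicate k 0) = pvRow k 0 from rfl]
  rw [show ((0:Int) :: List.replicate k 0) = List.replicate (k + 1) 0 from rfl]
  rw [← pvDp_zero k n]
  simp only [← pvSetD_zero, ← pvGetD_zero]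
  rw [show ((k + 1 : Nat) : Int) = (k : Int) + 1 by push_cast; ring]
  rw [show ((n + 1 : Nat) : Int) = (n : Int) + 1 by push_cast; ring]
  rw [pvOuterFold n k n le_rfl]
  rw [show ((n : Nat) : Int) = ((n : Nat) : Int) from rfl]
  rw [pvDp_getD k n n n le_rfl, if_pos le_rfl]
  simp only [PySem.Int.mod_eq_emod_of_pos pvP_pos]
  rw [show ((k : Int) + 1) = ((pvRow k n).length : Int) by rw [pvRow_length]; push_cast; ring]
  rw [PySem.List.foldl_pyRange_zero_pyGetD' (pvRow k n) 0 (fun acc x => (acc + x) % pvP) 0]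
  rw [pvFoldSum (pvRow k n) 0 (by norm_num)]
  simp

theorem pvMod_modeq (a : Int) : a % pvP ≡ a [ZMOD pvP] :=
  Int.emod_emod_of_dvd a (dvd_refl pvP)

theorem pvRow_last (k i : Nat) : ∀ j ≤ k, j ≤ i →
    (pvRow k i).getD j 0 ≡ 5 ^ j * (pvRow k (i - j)).getD 0 0 [ZMOD pvP] := by
  induction i with
  | zero =>
    intro j hjk hj
    match j, hj with
    | 0, _ => simp [Int.ModEq.refl]
  | succ i ih =>
    intro j hjk hj
    match j with
    | 0 => simp [Int.ModEq.refl]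
    | j + 1 =>
      rw [pvRow_getD_succ k i j (by omega)]
      calc (pvRow k i).getD j 0 * 5 % pvP
          ≡ (pvRow k i).getD j 0 * 5 [ZMOD pvP] := pvMod_modeq _
        _ ≡ (5 ^ j * (pvRow k (i - j)).getD 0 0) * 5 [ZMOD pvP] :=
            Int.ModEq.mul_right 5 (ih j (by omega) (by omega))
        _ = 5 ^ (j + 1) * (pvRow k (i + 1 - (j + 1))).getD 0 0 := by
            rw [show i + 1 - (j + 1) = i - j by omega]; ring

theorem pvSum_map_mul5 (l : List Int) :
    (l.map (fun x => x * 5 % pvP)).sum ≡ 5 * l.sum [ZMOD pvP] := by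
  induction l with
  | nil => simp [Int.ModEq.refl]
  | cons x t ih =>
    simp only [List.map_cons, List.sum_cons]
    calc x * 5 % pvP + (t.map (fun x => x * 5 % pvP)).sum
        ≡ x * 5 + 5 * t.sum [ZMOD pvP] := Int.ModEq.add (pvMod_modeq _) ih
      _ = 5 * (x + t.sum) := by ring

theorem pvRow_take_sum (k i : Nat) :
    ((pvRow k i).take k).sum = (pvRow k i).sum - (pvRow k i).getD k 0 := by
  have h : pvRow k i = (pvRow k i).take k ++ [(pvRow k i).getD k 0] := by
    have hk : k < (pvRow k i).length := by simp [pvRow_length]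
    rw [List.getD_eq_getElem?_getD, List.getElem?_eq_getElem hk]
    simp only [Option.getD_some]
    have h1 : pvRow k i = (pvRow k i).take (k + 1) := by
      rw [List.take_of_length_le (by simp [pvRow_length])]
    conv_lhs => rw [h1]
    rw [List.take_add_one, List.getElem?_eq_getElem hk]
    simp
  calc ((pvRow k i).take k).sum
      = ((pvRow k i).take k ++ [(pvRow k i).getD k 0]).sum - (pvRow k i).getD k 0 := by
        simp
    _ = (pvRow k i).sum - (pvRow k i).getD k 0 := by rw [← h]

theorem pvRow_sum_succ (k i : Nat) :
    (pvRow k (i + 1)).sum ≡ 26 * (pvRow k i).sum - 5 * (pvRow k i).getD k 0 [ZMOD pvP] := by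
  simp only [pvRow, List.sum_cons]
  calc 21 * (pvRow k i).sum % pvP + (((pvRow k i).take k).map (fun x => x * 5 % pvP)).sum
      ≡ 21 * (pvRow k i).sum + 5 * ((pvRow k i).take k).sum [ZMOD pvP] :=
        Int.ModEq.add (pvMod_modeq _) (pvSum_map_mul5 _)
    _ = 26 * (pvRow k i).sum - 5 * (pvRow k i).getD k 0 := by
        rw [pvRow_take_sum]; ring

def pvT (k : Nat) (m : Nat) : Int := (pvRow k m).sum % pvP
def pvH (k : Nat) (m : Nat) : Int := (pvRow k m).getD 0 0

def pvBF (k : Nat) : List Int × List Int → Int → List Int × List Int := fun th i =>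
    let t := th.1
    let h := th.2
    let d : Int := if i - 1 ≥ (k : Int) then
        PySem.Int.mod (PySem.Int.powMod 5 k pvP * PySem.List.pyGetD h (i - 1 - (k : Int)) 0) pvP else 0
    (t ++ [PySem.Int.mod (26 * PySem.List.pyGetD t (i - 1) 0 - 5 * d) pvP],
     h ++ [PySem.Int.mod (21 * PySem.List.pyGetD t (i - 1) 0) pvP])

theorem alt_eq_fold (n k : Nat) :
    kvowelwords_alt (n : Int) (k : Int) =
      PySem.List.pyGetD ((PySem.List.pyRange 1 ((n : Int) + 1) 1).foldl (pvBF k) ([1], [1])).1 (n : Int) 0 := rfl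

theorem pvH_mod (k m : Nat) : (21 * pvT k m) % pvP = pvH k (m + 1) := by
  simp only [pvT, pvH, pvRow, List.getD_cons_zero]
  rw [Int.mul_emod 21 ((pvRow k m).sum % pvP), Int.emod_emod_of_dvd _ (dvd_refl _), ← Int.mul_emod]

theorem pvBF_fold (k : Nat) : ∀ i : Nat,
    (PySem.List.pyRange 1 ((i : Int) + 1) 1).foldl (pvBF k) ([1], [1]) =
      ((List.range (i + 1)).map (pvT k), (List.range (i + 1)).map (pvH k)) := by
  intro i
  induction i with
  | zero =>
    simp [PySem.List.pyRange_one_eq_nil, pvT, pvH, pvRow, pvP]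
  | succ i ih =>
    have hsplit : PySem.List.pyRange 1 ((i + 1 : Nat) : Int) 1 ++ [((i + 1 : Nat) : Int)]
        = PySem.List.pyRange 1 (((i + 1 : Nat) : Int) + 1) 1 := by
      rw [PySem.List.pyRange_one_succ_right (by exact_mod_cast Nat.succ_le_succ (Nat.zero_le i))]
    rw [← hsplit, List.foldl_append]
    push_cast
    rw [ih]
    have hTi : PySem.List.pyGetD ((List.range (i + 1)).map (pvT k)) ((i : Int) + 1 - 1) 0 = pvT k i := by
      rw [show ((i : Int) + 1 - 1) = ((i : Nat) : Int) by ring, PySem.List.pyGetD_natCast,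
        List.getD_eq_getElem?_getD, List.getElem?_map, List.getElem?_range (by omega)]
      rfl
    have hd : (if (i : Int) + 1 - 1 ≥ (k : Int) then
        PySem.Int.mod (PySem.Int.powMod 5 k pvP *
          PySem.List.pyGetD ((List.range (i + 1)).map (pvH k)) ((i : Int) + 1 - 1 - (k : Int)) 0) pvP
        else 0) ≡ (pvRow k i).getD k 0 [ZMOD pvP] := by
      by_cases hki : (k : Int) ≤ (i : Int)
      · have hki' : k ≤ i := by exact_mod_cast hki
        rw [if_pos (by omega)]
        have hH : PySem.List.pyGetD ((List.range (i + 1)).map (pvH k)) ((i : Int) + 1 - 1 - (k : Int)) 0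
            = pvH k (i - k) := by
          rw [show ((i : Int) + 1 - 1 - (k : Int)) = ((i - k : Nat) : Int) by push_cast [hki']; ring,
            PySem.List.pyGetD_natCast, List.getD_eq_getElem?_getD, List.getElem?_map,
            List.getElem?_range (by omega)]
          rfl
        rw [hH, PySem.Int.mod_eq_emod_of_pos pvP_pos]
        calc (PySem.Int.powMod 5 k pvP * pvH k (i - k)) % pvP
            ≡ PySem.Int.powMod 5 k pvP * pvH k (i - k) [ZMOD pvP] := pvMod_modeq _
          _ ≡ 5 ^ k * pvH k (i - k) [ZMOD pvP] := by
              unfold PySem.Int.powMod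
              exact Int.ModEq.mul_right _ (by rw [PySem.Int.mod_eq_emod_of_pos pvP_pos]; exact pvMod_modeq _)
          _ ≡ (pvRow k i).getD k 0 [ZMOD pvP] := (pvRow_last k i k le_rfl hki').symm
      · rw [if_neg (by omega), pvRow_getD_eq_zero k i k (by omega) le_rfl]
    have hT1 : PySem.Int.mod (26 * pvT k i - 5 * (if (i : Int) + 1 - 1 ≥ (k : Int) then
        PySem.Int.mod (PySem.Int.powMod 5 k pvP *
          PySem.List.pyGetD ((List.range (i + 1)).map (pvH k)) ((i : Int) + 1 - 1 - (k : Int)) 0) pvP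
        else 0)) pvP = pvT k (i + 1) := by
      rw [PySem.Int.mod_eq_emod_of_pos pvP_pos]
      show _ % pvP = (pvRow k (i + 1)).sum % pvP
      exact (((Int.ModEq.mul_left 26 (pvMod_modeq _)).sub (Int.ModEq.mul_left 5 hd)).trans
        (pvRow_sum_succ k i).symm)
    have hH1 : PySem.Int.mod (21 * pvT k i) pvP = pvH k (i + 1) := by
      rw [PySem.Int.mod_eq_emod_of_pos pvP_pos]; exact pvH_mod k i
    simp only [List.foldl_cons, List.foldl_nil, pvBF, hTi]
    rw [hT1, hH1]
    simp [List.range_succ]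

theorem kvowelwords_alt_eq_model (n k : Nat) :
    kvowelwords_alt (n : Int) (k : Int) = (pvRow k n).sum % pvP := by
  rw [alt_eq_fold, pvBF_fold]
  simp only [PySem.List.pyGetD_natCast]
  rw [List.getD_eq_getElem?_getD, List.getElem?_map, List.getElem?_range (by omega)]
  simp [pvT]

-- ===== VERDICT (by name: the statement is the Claim_ definition above) =====
theorem kvowelwords_spec : Claim_equal_kvowelwords := by
  intro N K _ hpre
  obtain ⟨hN, hK⟩ := hpre
  unfold Spec_kvowelwords
  obtain ⟨n, rfl⟩ := Int.eq_ofNat_of_zero_le hN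
  obtain ⟨k, rfl⟩ := Int.eq_ofNat_of_zero_le hK
  rw [kvowelwords_eq_model, kvowelwords_alt_eq_model]
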